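-- pv_equiv track=rewrite | github.com/leggi112/AdventOfCode23 | D11/d11.py | get_expanded_coords
-- ===== SOURCE A (Python) =====
-- def get_expanded_coords(coords, factor, gap_list):
--     result = {}
--     for key, value in coords.items():
--         result[key] = [*value]
--
--     for g in gap_list[0]:
--         for key, value in coords.items():
--             if value[1] > g:
--                 result[key][1] += 1 * factor - 1
--
--     for g in gap_list[1]:
--         for key, value in coords.items():
--             if value[0] > g:
--                 result[key][0] += 1 * factor - 1
--     return result
-- ===== SOURCE B (Python) =====
-- from bisect import bisect_left
--
--
-- def get_expanded_coords(coords, factor, gap_list):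
--     row_gaps = sorted(gap_list[0])
--     col_gaps = sorted(gap_list[1])
--     d = factor - 1
--     result = {}
--     for key, value in coords.items():
--         new = [*value]
--         if row_gaps:
--             new[1] = value[1] + d * bisect_left(row_gaps, value[1])
--         if col_gaps:
--             new[0] = value[0] + d * bisect_left(col_gaps, value[0])
--         result[key] = new
--     return result
-- ===== Notes on version B (the rewrite author's own statement) =====
-- stated objective: faster
-- what changed: A makes one pass over all coordinates for every single gap row/column (repeatedly adding factor-1); B sorts each gap list once and, per coordinate, adds (factor-1) times the bisect_left count of gaps below it.
import Mathlib
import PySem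

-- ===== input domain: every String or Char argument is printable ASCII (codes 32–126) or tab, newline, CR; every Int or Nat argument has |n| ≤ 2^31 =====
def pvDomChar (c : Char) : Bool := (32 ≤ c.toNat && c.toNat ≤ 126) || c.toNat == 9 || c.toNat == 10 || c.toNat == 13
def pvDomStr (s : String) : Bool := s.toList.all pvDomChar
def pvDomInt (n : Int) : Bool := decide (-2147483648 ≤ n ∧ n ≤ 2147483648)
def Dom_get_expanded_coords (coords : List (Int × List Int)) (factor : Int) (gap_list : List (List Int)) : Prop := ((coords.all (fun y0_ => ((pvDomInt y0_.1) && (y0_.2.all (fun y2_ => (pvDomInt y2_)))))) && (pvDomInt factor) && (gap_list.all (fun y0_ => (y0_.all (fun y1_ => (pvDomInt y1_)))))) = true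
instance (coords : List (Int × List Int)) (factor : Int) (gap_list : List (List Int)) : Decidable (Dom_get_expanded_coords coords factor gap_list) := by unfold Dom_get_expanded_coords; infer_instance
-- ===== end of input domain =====

-- ===== PORT A =====
-- B sorts each gap list once and adds (factor-1)*bisect_left per coordinate instead of
-- A's pass over all points for every gap (objective: faster, asymptotically fewer ops).
-- Python dict arguments arrive as association lists; both ports rebuild the dict with
-- PySem.Dict.ofList (insertion order, last duplicate value wins), as Python's dict() does.
def get_expanded_coords (coords : List (Int × List Int)) (factor : Int) (gap_list : List (List Int)) : List (Int × List Int) :=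
  let c := PySem.Dict.ofList coords
  -- result = {}; for key, value in coords.items(): result[key] = [*value]
  let result := c.items.foldl (fun r p => r.insert p.1 p.2) PySem.Dict.empty
  -- for g in gap_list[0]: for key, value in coords.items(): if value[1] > g: result[key][1] += 1 * factor - 1
  let result := (PySem.List.pyGetD gap_list 0 []).foldl (fun r g =>
    c.items.foldl (fun r p =>
      if PySem.List.pyGetD p.2 1 0 > g then
        r.modify p.1 [] (fun v => v.set 1 (PySem.List.pyGetD v 1 0 + (1 * factor - 1)))
      else r) r) result
  -- for g in gap_list[1]: for key, value in coords.items(): if value[0] > g: result[key][0] += 1 * factor - 1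
  let result := (PySem.List.pyGetD gap_list 1 []).foldl (fun r g =>
    c.items.foldl (fun r p =>
      if PySem.List.pyGetD p.2 0 0 > g then
        r.modify p.1 [] (fun v => v.set 0 (PySem.List.pyGetD v 0 0 + (1 * factor - 1)))
      else r) r) result
  result.items

-- ===== PORT B =====
def get_expanded_coords_alt (coords : List (Int × List Int)) (factor : Int) (gap_list : List (List Int)) : List (Int × List Int) :=
  let c := PySem.Dict.ofList coords
  let rowGaps := PySem.List.sorted (PySem.List.pyGetD gap_list 0 []) (fun x => x)
  let colGaps := PySem.List.sorted (PySem.List.pyGetD gap_list 1 []) (fun x => x)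
  let d := factor - 1
  (c.items.foldl (fun r p =>
    r.insert p.1 (
      let v := p.2
      let v := if rowGaps ≠ [] then
          v.set 1 (PySem.List.pyGetD p.2 1 0 + d * (PySem.List.bisectLeft rowGaps (PySem.List.pyGetD p.2 1 0) : Int))
        else v
      let v := if colGaps ≠ [] then
          v.set 0 (PySem.List.pyGetD p.2 0 0 + d * (PySem.List.bisectLeft colGaps (PySem.List.pyGetD p.2 0 0) : Int))
        else v
      v)) PySem.Dict.empty).items

-- ===== PRECONDITION & SPEC =====
-- Pre_ excludes exactly the inputs on which the Python A raises: gap_list[0] and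
-- gap_list[1] are indexed unconditionally (IndexError when gap_list has < 2 entries),
-- and when a gap list is non-empty each dict value is indexed at 1 resp. 0 (IndexError
-- on values that are too short).  B raises on exactly the same inputs.
def Pre_get_expanded_coords (coords : List (Int × List Int)) (factor : Int) (gap_list : List (List Int)) : Prop :=
  2 ≤ gap_list.length ∧
  (PySem.List.pyGetD gap_list 0 [] ≠ [] → ∀ p ∈ (PySem.Dict.ofList coords).items, 2 ≤ p.2.length) ∧
  (PySem.List.pyGetD gap_list 1 [] ≠ [] → ∀ p ∈ (PySem.Dict.ofList coords).items, 1 ≤ p.2.length)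
instance (coords : List (Int × List Int)) (factor : Int) (gap_list : List (List Int)) : Decidable (Pre_get_expanded_coords coords factor gap_list) := by unfold Pre_get_expanded_coords; infer_instance
def pvWitness_get_expanded_coords : (List (Int × List Int)) × Int × List (List Int) :=
  ([(0, [1, 2]), (3, [4, 5])], 2, [[0, 3], [1]])
def Spec_get_expanded_coords (coords : List (Int × List Int)) (factor : Int) (gap_list : List (List Int)) (out : List (Int × List Int)) : Prop := out = get_expanded_coords_alt coords factor gap_list
instance (coords : List (Int × List Int)) (factor : Int) (gap_list : List (List Int)) (out : List (Int × List Int)) : Decidable (Spec_get_expanded_coords coords factor gap_list out) := by unfold Spec_get_expanded_coords; infer_instance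

-- ===== CLAIM (what is proved, stated in full; the proofs are below) =====
def Claim_equal_get_expanded_coords : Prop := ∀ (coords : List (Int × List Int)) (factor : Int) (gap_list : List (List Int)), Dom_get_expanded_coords coords factor gap_list → Pre_get_expanded_coords coords factor gap_list → Spec_get_expanded_coords coords factor gap_list (get_expanded_coords coords factor gap_list)

-- ===== LEMMAS AND PROOFS =====

-- One inner pass of A leaves the entry of a key not occurring in the pair list alone.
lemma pvPassGetDNotMem (l : List (Int × List Int)) (q : (Int × List Int) → Prop)
    [DecidablePred q] (f : List Int → List Int) (k : Int) (hk : k ∉ l.map Prod.fst)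
    (r : PySem.Dict Int (List Int)) :
    (l.foldl (fun r p => if q p then r.modify p.1 [] f else r) r).getD k [] = r.getD k [] := by
  induction l generalizing r with
  | nil => rfl
  | cons p t ih =>
    simp only [List.map_cons, List.mem_cons, not_or] at hk
    simp only [List.foldl_cons]
    rw [ih hk.2]
    by_cases h : q p
    · simp [h, PySem.Dict.getD_modify, hk.1]
    · simp [h]

-- One inner pass of A, over a key-distinct pair list containing (k, v), updates the
-- entry at k once (iff the guard holds at v) and nothing else at k.
lemma pvPassGetDMem (l : List (Int × List Int)) (q : (Int × List Int) → Prop)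
    [DecidablePred q] (f : List Int → List Int) (k : Int) (v : List Int)
    (hnd : (l.map Prod.fst).Nodup) (hmem : (k, v) ∈ l) (r : PySem.Dict Int (List Int)) :
    (l.foldl (fun r p => if q p then r.modify p.1 [] f else r) r).getD k []
      = if q (k, v) then f (r.getD k []) else r.getD k [] := by
  induction l generalizing r with
  | nil => cases hmem
  | cons p t ih =>
    simp only [List.map_cons, List.nodup_cons] at hnd
    simp only [List.foldl_cons]
    rcases List.mem_cons.1 hmem with h | h
    · subst h
      rw [pvPassGetDNotMem t q f k hnd.1]
      by_cases hc : q (k, v)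
      · simp [hc]
      · simp [hc]
    · have hkmem : k ∈ t.map Prod.fst := List.mem_map.2 ⟨(k, v), h, rfl⟩
      have hne : k ≠ p.1 := fun e => hnd.1 (e ▸ hkmem)
      rw [ih hnd.2 h]
      by_cases hcp : q p <;> simp [hcp, PySem.Dict.getD_modify, hne]

-- A's outer gap loop applies f to the entry at k once per gap satisfying the guard.
lemma pvLoopGetD (gs : List Int) (l : List (Int × List Int))
    (q : List Int → Int → Prop) [inst : ∀ v g, Decidable (q v g)]
    (f : List Int → List Int) (k : Int) (v : List Int)
    (hnd : (l.map Prod.fst).Nodup) (hmem : (k, v) ∈ l) (r : PySem.Dict Int (List Int)) :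
    (gs.foldl (fun r g => l.foldl (fun r p => if q p.2 g then r.modify p.1 [] f else r) r) r).getD k []
      = f^[gs.countP (fun g => decide (q v g))] (r.getD k []) := by
  induction gs generalizing r with
  | nil => rfl
  | cons g t ih =>
    simp only [List.foldl_cons, List.countP_cons]
    rw [ih, pvPassGetDMem l (fun p => q p.2 g) f k v hnd hmem r]
    by_cases h : q v g
    · simp [h, Function.iterate_succ_apply]
    · simp [h]

-- Iterating "bump slot i by n" is one bump by n*d (index in range).
lemma pvIterateBump (i : Nat) (d : Int) (v : List Int) (hi : i < v.length) (n : Nat) :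
    (fun w => w.set i (PySem.List.pyGetD w (i : Int) 0 + d))^[n] v
      = v.set i (PySem.List.pyGetD v (i : Int) 0 + n * d) := by
  induction n generalizing v with
  | zero =>
    simp only [Function.iterate_zero, id_eq, Nat.cast_zero, zero_mul, add_zero]
    rw [PySem.List.pyGetD_natCast, List.getD_eq_getElem _ _ hi, List.set_getElem_self]
  | succ m ih =>
    rw [Function.iterate_succ_apply, ih _ (by simpa using hi)]
    simp only [PySem.List.pyGetD_natCast]
    have hg : (v.set i (v.getD i 0 + d)).getD i 0 = v.getD i 0 + d := by
      rw [List.getD_eq_getElem _ _ (by simpa using hi)]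
      exact List.getElem_set_self _
    rw [hg, List.set_set]
    congr 1
    push_cast
    ring

-- bisect_left on a sorted list counts the elements below the probe.
lemma pvBisectLeftEqCountP (xs : List Int) (x : Int) (h : xs.Pairwise (· ≤ ·)) :
    PySem.List.bisectLeft xs x = xs.countP (fun y => decide (y < x)) := by
  obtain ⟨h1, h2, h3⟩ := PySem.List.bisectLeft_spec xs x h
  set n := PySem.List.bisectLeft xs x with hn
  have hct : (xs.take n).countP (fun y => decide (y < x)) = n := by
    rw [List.countP_eq_length.2, List.length_take, Nat.min_eq_left h1]
    intro a ha
    obtain ⟨j, hj, rfl⟩ := List.getElem_of_mem ha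
    have hj' : j < n := lt_of_lt_of_le hj (by simp [List.length_take])
    rw [List.getElem_take]
    exact decide_eq_true (h2 j (lt_of_lt_of_le hj' h1) hj')
  have hcd : (xs.drop n).countP (fun y => decide (y < x)) = 0 := by
    rw [List.countP_eq_zero]
    intro a ha
    obtain ⟨j, hj, rfl⟩ := List.getElem_of_mem ha
    have hdl : (xs.drop n).length = xs.length - n := List.length_drop
    rw [List.getElem_drop]
    simp only [decide_eq_true_eq]
    exact not_lt.2 (h3 (n + j) (by omega) (by omega))
  calc n = (xs.take n).countP (fun y => decide (y < x))
            + (xs.drop n).countP (fun y => decide (y < x)) := by omega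
    _ = xs.countP (fun y => decide (y < x)) := by
          conv_rhs => rw [← List.take_append_drop n xs]
          rw [List.countP_append]

-- One inner pass of A preserves the key list when every modified key is present.
lemma pvKeysPass (l : List (Int × List Int)) (q : (Int × List Int) → Prop)
    [DecidablePred q] (f : List Int → List Int) :
    ∀ r : PySem.Dict Int (List Int), (∀ p ∈ l, p.1 ∈ r.keys) →
    (l.foldl (fun r p => if q p then r.modify p.1 [] f else r) r).keys = r.keys := by
  induction l with
  | nil => intro r _; rfl
  | cons p t ih =>
    intro r hmem
    simp only [List.foldl_cons]
    by_cases h : q p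
    · have hk : (r.modify p.1 [] f).keys = r.keys := by
        rw [PySem.Dict.keys_modify]
        exact PySem.Dict.keys_insert_of_contains r _
          ((PySem.Dict.contains_iff_mem_keys _ _).2 (hmem p (by simp)))
      simp only [h, if_true]
      rw [ih _ (by intro a ha; rw [hk]; exact hmem a (by simp [ha])), hk]
    · simp only [h, if_false]
      exact ih r (fun a ha => hmem a (by simp [ha]))

-- A's outer gap loop preserves the key list.
lemma pvKeysLoop (gs : List Int) (l : List (Int × List Int))
    (q : List Int → Int → Prop) [inst : ∀ v g, Decidable (q v g)]
    (f : List Int → List Int) :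
    ∀ r : PySem.Dict Int (List Int), (∀ p ∈ l, p.1 ∈ r.keys) →
    (gs.foldl (fun r g => l.foldl (fun r p => if q p.2 g then r.modify p.1 [] f else r) r) r).keys = r.keys := by
  induction gs with
  | nil => intro r _; rfl
  | cons g t ih =>
    intro r hmem
    simp only [List.foldl_cons]
    have h1 := pvKeysPass l (fun p => q p.2 g) f r hmem
    rw [ih _ (by intro a ha; rw [h1]; exact hmem a ha), h1]

-- Rebuilding a key-distinct dict by inserting its own items into {} gives it back.
lemma pvRebuild (c : PySem.Dict Int (List Int)) (hnd : c.keys.Nodup) :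
    c.items.foldl (fun r p => r.insert p.1 p.2) PySem.Dict.empty = c := by
  apply PySem.Dict.ext
  rw [PySem.Dict.items_foldl_insert_fresh c.items Prod.fst Prod.snd PySem.Dict.empty
        (fun a _ => PySem.Dict.contains_empty a.1) hnd]
  show ([] : List (Int × List Int)) ++ _ = _
  simp

-- B's per-entry value (definitionally the body of get_expanded_coords_alt's loop).
def pvBVal (factor : Int) (gap_list : List (List Int)) (p : Int × List Int) : List Int :=
  let rowGaps := PySem.List.sorted (PySem.List.pyGetD gap_list 0 []) (fun x => x)
  let colGaps := PySem.List.sorted (PySem.List.pyGetD gap_list 1 []) (fun x => x)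
  let v := p.2
  let v := if rowGaps ≠ [] then
      v.set 1 (PySem.List.pyGetD p.2 1 0 + (factor - 1) *
        (PySem.List.bisectLeft rowGaps (PySem.List.pyGetD p.2 1 0) : Int))
    else v
  let v := if colGaps ≠ [] then
      v.set 0 (PySem.List.pyGetD p.2 0 0 + (factor - 1) *
        (PySem.List.bisectLeft colGaps (PySem.List.pyGetD p.2 0 0) : Int))
    else v
  v

-- ===== VERDICT (by name: the statement is the Claim_ definition above) =====
theorem get_expanded_coords_spec : Claim_equal_get_expanded_coords := by
  intro coords factor gap_list hdom hpre
  obtain ⟨hlen, hrow, hcol⟩ := hpre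
  unfold Spec_get_expanded_coords
  have hBdef : get_expanded_coords_alt coords factor gap_list
      = ((PySem.Dict.ofList coords).items.foldl
          (fun r p => r.insert p.1 (pvBVal factor gap_list p)) PySem.Dict.empty).items := rfl
  have hAdef : get_expanded_coords coords factor gap_list
      = ((PySem.List.pyGetD gap_list 1 []).foldl (fun r g =>
          (PySem.Dict.ofList coords).items.foldl (fun r p =>
            if PySem.List.pyGetD p.2 0 0 > g then
              r.modify p.1 [] (fun v => v.set 0 (PySem.List.pyGetD v 0 0 + (1 * factor - 1)))
            else r) r)
          ((PySem.List.pyGetD gap_list 0 []).foldl (fun r g =>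
            (PySem.Dict.ofList coords).items.foldl (fun r p =>
              if PySem.List.pyGetD p.2 1 0 > g then
                r.modify p.1 [] (fun v => v.set 1 (PySem.List.pyGetD v 1 0 + (1 * factor - 1)))
              else r) r)
            ((PySem.Dict.ofList coords).items.foldl
              (fun r p => r.insert p.1 p.2) PySem.Dict.empty))).items := rfl
  rw [hAdef, hBdef]
  set c := PySem.Dict.ofList coords with hc
  have hnd : c.keys.Nodup := PySem.Dict.nodup_keys_ofList coords
  have hndf : (c.items.map Prod.fst).Nodup := hnd
  rw [pvRebuild c hnd]
  set f1 : List Int → List Int := fun v => v.set 1 (PySem.List.pyGetD v 1 0 + (1 * factor - 1)) with hf1d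
  set f0 : List Int → List Int := fun v => v.set 0 (PySem.List.pyGetD v 0 0 + (1 * factor - 1)) with hf0d
  set gs0 := PySem.List.pyGetD gap_list 0 [] with hgs0
  set gs1 := PySem.List.pyGetD gap_list 1 [] with hgs1
  set r1 := gs0.foldl (fun r g => c.items.foldl
      (fun r p => if PySem.List.pyGetD p.2 1 0 > g then r.modify p.1 [] f1 else r) r) c with hr1
  set r2 := gs1.foldl (fun r g => c.items.foldl
      (fun r p => if PySem.List.pyGetD p.2 0 0 > g then r.modify p.1 [] f0 else r) r) r1 with hr2
  -- keys survive both loops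
  have hmemk : ∀ p ∈ c.items, p.1 ∈ c.keys := fun p hp => List.mem_map.2 ⟨p, hp, rfl⟩
  have hk1 : r1.keys = c.keys := by
    rw [hr1]; exact pvKeysLoop gs0 c.items (fun v g => PySem.List.pyGetD v 1 0 > g) f1 c hmemk
  have hk2 : r2.keys = c.keys := by
    rw [hr2, pvKeysLoop gs1 c.items (fun v g => PySem.List.pyGetD v 0 0 > g) f0 r1
          (by intro p hp; rw [hk1]; exact hmemk p hp)]
    exact hk1
  -- both sides as a map over c.items
  have hA : r2.items = c.items.map (fun p => (p.1, r2.getD p.1 [])) := by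
    rw [PySem.Dict.items_eq_map_keys r2 (hk2 ▸ hnd) [], hk2]
    show List.map _ (c.items.map Prod.fst) = _
    rw [List.map_map]
    rfl
  have hB : (c.items.foldl (fun r p => r.insert p.1 (pvBVal factor gap_list p)) PySem.Dict.empty).items
      = c.items.map (fun p => (p.1, pvBVal factor gap_list p)) := by
    rw [PySem.Dict.items_foldl_insert_fresh c.items Prod.fst (fun p => pvBVal factor gap_list p)
          PySem.Dict.empty (fun a _ => PySem.Dict.contains_empty a.1) hndf]
    show ([] : List (Int × List Int)) ++ _ = _
    simp
  rw [hA, hB]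
  apply List.map_congr_left
  intro p hp
  have hp' : (p.1, p.2) ∈ c.items := by simpa using hp
  simp only [Prod.mk.injEq, true_and]
  -- value at key p.1 after both of A's loops
  have hv1 : r1.getD p.1 [] = f1^[gs0.countP (fun g => decide (PySem.List.pyGetD p.2 1 0 > g))] p.2 := by
    rw [hr1, pvLoopGetD gs0 c.items (fun v g => PySem.List.pyGetD v 1 0 > g) f1 p.1 p.2 hndf hp' c,
        PySem.Dict.getD_of_mem_items c hp' hnd []]
  have hv2 : r2.getD p.1 [] = f0^[gs1.countP (fun g => decide (PySem.List.pyGetD p.2 0 0 > g))] (r1.getD p.1 []) := by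
    rw [hr2, pvLoopGetD gs1 c.items (fun v g => PySem.List.pyGetD v 0 0 > g) f0 p.1 p.2 hndf hp' r1]
  rw [hv2, hv1]
  simp only [pvBVal]
  rw [← hgs0, ← hgs1]
  -- counts agree with bisect_left on the sorted gap lists
  have hcnt : ∀ (gs : List Int) (x : Int),
      (PySem.List.bisectLeft (PySem.List.sorted gs (fun x => x)) x : Int)
        = (gs.countP (fun g => decide (x > g)) : Int) := by
    intro gs x
    have hsp : (PySem.List.sorted gs (fun x => x)).Pairwise (· ≤ ·) := by
      simpa using PySem.List.sorted_pairwise gs (fun x => x)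
    rw [pvBisectLeftEqCountP _ x hsp,
        (PySem.List.sorted_perm gs (fun x => x) false).countP_eq]
  set n1 := gs0.countP (fun g => decide (PySem.List.pyGetD p.2 1 0 > g)) with hn1
  set n0 := gs1.countP (fun g => decide (PySem.List.pyGetD p.2 0 0 > g)) with hn0
  -- the row update
  have hw : f1^[n1] p.2 = (if PySem.List.sorted gs0 (fun x => x) ≠ [] then
      p.2.set 1 (PySem.List.pyGetD p.2 1 0 + (factor - 1) *
        (PySem.List.bisectLeft (PySem.List.sorted gs0 (fun x => x)) (PySem.List.pyGetD p.2 1 0) : Int))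
    else p.2) := by
    by_cases h0 : gs0 = []
    · rw [if_neg (by simp [h0, PySem.List.sorted_eq_nil_iff])]
      simp [hn1, h0]
    · have hlen2 : 2 ≤ p.2.length := hrow h0 p hp
      rw [if_pos (by simp [PySem.List.sorted_eq_nil_iff, h0]), hcnt gs0, ← hn1, hf1d]
      have hit := pvIterateBump 1 (1 * factor - 1) p.2 (by omega) n1
      push_cast at hit
      rw [hit]
      congr 1
      ring
  rw [hw]
  -- the column update
  set w := (if PySem.List.sorted gs0 (fun x => x) ≠ [] then
      p.2.set 1 (PySem.List.pyGetD p.2 1 0 + (factor - 1) *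
        (PySem.List.bisectLeft (PySem.List.sorted gs0 (fun x => x)) (PySem.List.pyGetD p.2 1 0) : Int))
    else p.2) with hwdef
  by_cases h1 : gs1 = []
  · rw [if_neg (by simp [h1, PySem.List.sorted_eq_nil_iff])]
    simp [hn0, h1]
  · have hlen1 : 1 ≤ p.2.length := hcol h1 p hp
    have hlw : ∀ w : List Int, (w = p.2 ∨ ∃ x, w = p.2.set 1 x) →
        PySem.List.pyGetD w 0 0 = PySem.List.pyGetD p.2 0 0 ∧ 0 < w.length := by
      rintro w (rfl | ⟨x, rfl⟩)
      · exact ⟨rfl, by omega⟩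
      · refine ⟨?_, by simpa using hlen1⟩
        rw [show ((0 : Int)) = ((0 : Nat) : Int) from rfl, PySem.List.pyGetD_natCast,
            PySem.List.pyGetD_natCast, List.getD_eq_getElem _ _ (by simpa using hlen1),
            List.getD_eq_getElem _ _ (by omega), List.getElem_set_ne (by omega)]
    have hwcase : w = p.2 ∨ ∃ x, w = p.2.set 1 x := by
      rw [hwdef]
      split
      · right; exact ⟨_, rfl⟩
      · left; rfl
    obtain ⟨hget, hpos⟩ := hlw w hwcase
    rw [if_pos (by simp [PySem.List.sorted_eq_nil_iff, h1]), hcnt gs1, ← hn0, hf0d]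
    have hit := pvIterateBump 0 (1 * factor - 1) w hpos n0
    push_cast at hit
    rw [hit, hget]
    congr 1
    ring
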